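-- pv_equiv track=rewrite | github.com/ansh-bitontree/icd10-mcp | src/icd10_mcp/selector.py | _drop_ancestors_and_unspecified
-- ===== SOURCE A (Python) =====
-- from typing import Any, Dict, List, Optional, Set
--
-- def _is_unspecified_title(title: str) -> bool:
--     t = (title or "").lower()
--     return "unspecified" in t or "unspec" in t
--
-- def _drop_ancestors_and_unspecified(selected: List[Dict[str, str]]) -> List[Dict[str, str]]:
--     if not selected:
--         return selected
--
--     codes = [s.get("code", "").strip() for s in selected if s.get("code")]
--     titles = {s.get("code", "").strip(): (s.get("title", "") or "") for s in selected}
--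
--     def category(c: str) -> str:
--         return c.split(".")[0].strip()
--
--     drop = set()
--
--     for c in codes:
--         for o in codes:
--             if c == o:
--                 continue
--             if o.startswith(c) and len(o) > len(c):
--                 drop.add(c)
--
--     for c in codes:
--         if _is_unspecified_title(titles.get(c, "")):
--             cat = category(c)
--             if any(
--                 (o != c) and (category(o) == cat) and (not _is_unspecified_title(titles.get(o, "")))
--                 for o in codes
--             ):
--                 drop.add(c)
--
--     return [s for s in selected if (s.get("code", "").strip() not in drop)]
-- ===== SOURCE B (Python) =====
-- def _is_unspecified_title(title: str) -> bool:
--     t = (title or "").lower()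
--     return "unspecified" in t or "unspec" in t
--
-- def _drop_ancestors_and_unspecified(selected):
--     if not selected:
--         return selected
--
--     codes = []
--     titles = {}
--     for s in selected:
--         c = s.get("code", "").strip()
--         if s.get("code"):
--             codes.append(c)
--         titles[c] = s.get("title", "") or ""
--
--     # every proper prefix of every code, collected once
--     prefixes = set()
--     for o in codes:
--         for k in range(len(o)):
--             prefixes.add(o[:k])
--
--     # categories that contain at least one non-unspecified code
--     specified_cats = set()
--     for c in codes:
--         if not _is_unspecified_title(titles[c]):
--             specified_cats.add(c.split(".")[0].strip())
--
--     drop = set()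
--     for c in codes:
--         if c in prefixes or (_is_unspecified_title(titles[c])
--                              and c.split(".")[0].strip() in specified_cats):
--             drop.add(c)
--
--     return [s for s in selected if s.get("code", "").strip() not in drop]
-- ===== Notes on version B (the rewrite author's own statement) =====
-- stated objective: alternative
-- what changed: B replaces A's all-pairs startswith scan by a set of all proper prefixes of the codes built once (ancestor test becomes one set lookup), and replaces A's per-code inner any() scan by a precomputed set of categories that contain a non-unspecified code.
import Mathlib
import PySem

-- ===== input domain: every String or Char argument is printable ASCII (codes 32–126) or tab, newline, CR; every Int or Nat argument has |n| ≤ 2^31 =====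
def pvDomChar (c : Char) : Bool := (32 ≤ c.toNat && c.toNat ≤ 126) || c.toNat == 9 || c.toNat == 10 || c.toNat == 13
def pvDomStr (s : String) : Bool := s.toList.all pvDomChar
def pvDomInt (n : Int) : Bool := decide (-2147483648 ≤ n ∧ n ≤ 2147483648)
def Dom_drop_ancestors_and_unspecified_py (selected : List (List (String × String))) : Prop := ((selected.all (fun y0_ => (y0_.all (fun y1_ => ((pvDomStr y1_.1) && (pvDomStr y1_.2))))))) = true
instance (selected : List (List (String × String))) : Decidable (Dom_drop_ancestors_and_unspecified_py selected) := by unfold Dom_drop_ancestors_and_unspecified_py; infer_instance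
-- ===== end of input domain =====

-- B builds the drop set from a one-pass set of all proper code prefixes and a
-- precomputed set of categories containing a non-unspecified code, instead of
-- A's two nested scans over the code list (an alternative algorithm, same result).

-- ===== PORT A =====
-- shared helpers (both Pythons use the module-level _is_unspecified_title and the
-- same dict lookups / code normalisation)

-- s.get(k, dflt) on an association-list dict: first match
def pvGetD (s : List (String × String)) (k dflt : String) : String :=
  match s.find? (fun p => p.1 == k) with
  | some p => p.2
  | none => dflt

-- 'if s.get("code")': the value is a str, so truthy ⟺ present and non-empty,
-- which is exactly pvGetD s "code" "" ≠ ""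
def pvHasCode (s : List (String × String)) : Bool := !(pvGetD s "code" "" == "")

-- s.get("code", "").strip()
def pvCode (s : List (String × String)) : String := PySem.Str.strip (pvGetD s "code" "")

-- _is_unspecified_title; '(title or "")' is the identity on str values
def pvIsUnspec (title : String) : Bool :=
  let t := PySem.Str.lower title
  PySem.Str.isIn "unspecified" t || PySem.Str.isIn "unspec" t

-- category(c) = c.split(".")[0].strip()  (split("."), never empty)
def pvCategory (c : String) : String :=
  PySem.Str.strip (((PySem.Str.split? c ".").getD []).headD "")

def drop_ancestors_and_unspecified_py (selected : List (List (String × String))) : List (List (String × String)) :=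
  if selected = [] then selected else
  let codes : List String := (selected.filter pvHasCode).map pvCode
  -- titles = {code: (title or "")}; '(… or "")' is the identity since the default is ""
  let titles : PySem.Dict String String :=
    selected.foldl (fun d s => d.insert (pvCode s) (pvGetD s "title" "")) PySem.Dict.empty
  let drop1 : PySem.Set String :=
    codes.foldl (fun drop c =>
      codes.foldl (fun drop o =>
        if c == o then drop
        else if PySem.Str.startswith o c && PySem.Str.len c < PySem.Str.len o then PySem.Set.add drop c
        else drop) drop) PySem.Set.empty
  let drop2 : PySem.Set String :=
    codes.foldl (fun drop c =>
      if pvIsUnspec (titles.getD c "") then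
        if codes.any (fun o => !(o == c) && pvCategory o == pvCategory c && !(pvIsUnspec (titles.getD o ""))) then
          PySem.Set.add drop c
        else drop
      else drop) drop1
  selected.filter (fun s => !(PySem.Set.contains drop2 (pvCode s)))

-- ===== PORT B =====
def drop_ancestors_and_unspecified_py_alt (selected : List (List (String × String))) : List (List (String × String)) :=
  if selected = [] then selected else
  let ct : List String × PySem.Dict String String :=
    selected.foldl (fun acc s =>
      ((if pvHasCode s then acc.1 ++ [pvCode s] else acc.1),
       acc.2.insert (pvCode s) (pvGetD s "title" ""))) ([], PySem.Dict.empty)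
  let codes := ct.1
  let titles := ct.2
  -- every proper prefix o[:k], k in range(len(o)), of every code, collected once
  let prefixes : PySem.Set String :=
    codes.foldl (fun pref o =>
      (PySem.List.pyRange 0 (PySem.Str.len o)).foldl
        (fun pref k => PySem.Set.add pref (PySem.Str.slice o none (some k))) pref) PySem.Set.empty
  -- categories owning at least one non-unspecified code
  let specCats : PySem.Set String :=
    codes.foldl (fun cs c =>
      if !(pvIsUnspec (titles.getD c "")) then PySem.Set.add cs (pvCategory c) else cs) PySem.Set.empty
  let drop : PySem.Set String :=
    codes.foldl (fun drop c =>
      if PySem.Set.contains prefixes c ||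
         (pvIsUnspec (titles.getD c "") && PySem.Set.contains specCats (pvCategory c)) then
        PySem.Set.add drop c
      else drop) PySem.Set.empty
  selected.filter (fun s => !(PySem.Set.contains drop (pvCode s)))

-- ===== PRECONDITION & SPEC =====
def Spec_drop_ancestors_and_unspecified_py (selected : List (List (String × String))) (out : List (List (String × String))) : Prop := out = drop_ancestors_and_unspecified_py_alt selected
instance (selected : List (List (String × String))) (out : List (List (String × String))) : Decidable (Spec_drop_ancestors_and_unspecified_py selected out) := by unfold Spec_drop_ancestors_and_unspecified_py; infer_instance

-- ===== CLAIM (what is proved, stated in full; the proofs are below) =====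
def Claim_equal_drop_ancestors_and_unspecified_py : Prop := ∀ (selected : List (List (String × String))), Dom_drop_ancestors_and_unspecified_py selected → Spec_drop_ancestors_and_unspecified_py selected (drop_ancestors_and_unspecified_py selected)

-- ===== LEMMAS AND PROOFS =====

-- a fold whose step only adds elements to a PySem.Set: membership characterisation
theorem pv_mem_foldl_of_step {α β : Type} [BEq β] [LawfulBEq β]
    (F : PySem.Set β → α → PySem.Set β) (P : α → β → Prop)
    (h : ∀ (s : PySem.Set β) (x : α) (y : β), y ∈ F s x ↔ y ∈ s ∨ P x y)
    (l : List α) (init : PySem.Set β) (y : β) :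
    y ∈ l.foldl F init ↔ y ∈ init ∨ ∃ x ∈ l, P x y := by
  induction l generalizing init with
  | nil => simp
  | cons a t ih =>
    simp only [List.foldl_cons, ih, h, List.mem_cons]
    constructor
    · rintro ((hy | hp) | ⟨x, hx, hp⟩)
      · exact Or.inl hy
      · exact Or.inr ⟨a, Or.inl rfl, hp⟩
      · exact Or.inr ⟨x, Or.inr hx, hp⟩
    · rintro (hy | ⟨x, (rfl | hx), hp⟩)
      · exact Or.inl (Or.inl hy)
      · exact Or.inl (Or.inr hp)
      · exact Or.inr ⟨x, hx, hp⟩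

-- proper-prefix characterisation: y = o[:k] for some k in range(len(o)) ⟺ o startswith y and y is shorter
theorem pv_prefix_iff (o y : String) :
    (∃ k ∈ PySem.List.pyRange 0 (PySem.Str.len o), PySem.Str.slice o none (some k) = y) ↔
    (PySem.Str.startswith o y = true ∧ PySem.Str.len y < PySem.Str.len o) := by
  constructor
  · rintro ⟨k, hk, rfl⟩
    rw [PySem.List.mem_pyRange_one] at hk
    obtain ⟨hk0, hkl⟩ := hk
    rw [PySem.Str.len_eq] at hkl
    have hts : (PySem.Str.slice o none (some k)).toList = o.toList.take k.toNat := by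
      rw [PySem.Str.toList_slice]
      exact PySem.List.slice_to o.toList hk0
    constructor
    · rw [PySem.Str.startswith_eq, PySem.Chars.startswith_iff, hts]
      exact List.take_prefix _ _
    · rw [PySem.Str.len_eq, PySem.Str.len_eq, hts, List.length_take]
      omega
  · rintro ⟨hsw, hlen⟩
    rw [PySem.Str.len_eq, PySem.Str.len_eq] at hlen
    refine ⟨(y.toList.length : Int), ?_, ?_⟩
    · rw [PySem.List.mem_pyRange_one, PySem.Str.len_eq]
      omega
    · apply String.toList_inj.mp
      rw [PySem.Str.toList_slice]
      have h1 : PySem.Chars.slice o.toList none (some (y.toList.length : Int)) =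
          o.toList.take ((y.toList.length : Int)).toNat :=
        PySem.List.slice_to o.toList (by positivity)
      rw [h1, Int.toNat_natCast]
      rw [PySem.Str.startswith_eq, PySem.Chars.startswith_iff] at hsw
      exact (List.prefix_iff_eq_take.mp hsw).symm

-- the two drop conditions, as plain propositions over the code list / title dict
def pvAnc (codes : List String) (y : String) : Prop :=
  ∃ o ∈ codes, ¬(y = o) ∧ PySem.Str.startswith o y = true ∧ PySem.Str.len y < PySem.Str.len o

def pvUns (codes : List String) (titles : PySem.Dict String String) (y : String) : Prop :=
  pvIsUnspec (titles.getD y "") = true ∧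
    ∃ o ∈ codes, ¬(o = y) ∧ pvCategory o = pvCategory y ∧ pvIsUnspec (titles.getD o "") = false

-- A's nested ancestor scan builds exactly {c ∈ codes | pvAnc codes c}
theorem pv_mem_dropA1 (codes : List String) (y : String) :
    y ∈ codes.foldl (fun drop c =>
        codes.foldl (fun drop o =>
          if c == o then drop
          else if PySem.Str.startswith o c && PySem.Str.len c < PySem.Str.len o then PySem.Set.add drop c
          else drop) drop) PySem.Set.empty ↔
    ∃ c ∈ codes, pvAnc codes c ∧ y = c := by
  have hstep : ∀ (s : PySem.Set String) (c : String) (y : String),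
      y ∈ codes.foldl (fun drop o =>
          if c == o then drop
          else if PySem.Str.startswith o c && PySem.Str.len c < PySem.Str.len o then PySem.Set.add drop c
          else drop) s ↔
      y ∈ s ∨ (pvAnc codes c ∧ y = c) := by
    intro s c y
    rw [pv_mem_foldl_of_step _
      (fun o y => (¬(c = o) ∧ PySem.Str.startswith o c = true ∧ PySem.Str.len c < PySem.Str.len o) ∧ y = c)
      ?_ codes s y]
    · constructor
      · rintro (hy | ⟨o, ho, ⟨h1, h2, h3⟩, rfl⟩)
        · exact Or.inl hy
        · exact Or.inr ⟨⟨o, ho, h1, h2, h3⟩, rfl⟩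
      · rintro (hy | ⟨⟨o, ho, h1, h2, h3⟩, rfl⟩)
        · exact Or.inl hy
        · exact Or.inr ⟨o, ho, ⟨h1, h2, h3⟩, rfl⟩
    · intro s o y
      by_cases h1 : c = o
      · subst h1
        simp
      · rw [if_neg (by simp [h1] : ¬ ((c == o) = true))]
        cases h2 : (PySem.Str.startswith o c && decide (PySem.Str.len c < PySem.Str.len o)) with
        | true =>
          rw [if_pos rfl, PySem.Set.mem_add]
          rw [Bool.and_eq_true, decide_eq_true_iff] at h2
          obtain ⟨h2a, h2b⟩ := h2
          dsimp only
          tauto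
        | false =>
          rw [if_neg (by simp : ¬ ((false : Bool) = true))]
          dsimp only
          constructor
          · exact Or.inl
          · rintro (hy | ⟨⟨hne, hsw, hlt⟩, rfl⟩)
            · exact hy
            · rw [hsw, decide_eq_true hlt] at h2
              cases h2
  rw [pv_mem_foldl_of_step _ (fun c y => pvAnc codes c ∧ y = c) hstep codes PySem.Set.empty y]
  simp [PySem.Set.empty]

-- A's second pass over init
theorem pv_mem_dropA2 (codes : List String) (titles : PySem.Dict String String)
    (init : PySem.Set String) (y : String) :
    y ∈ codes.foldl (fun drop c =>
        if pvIsUnspec (titles.getD c "") then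
          if codes.any (fun o => !(o == c) && pvCategory o == pvCategory c && !(pvIsUnspec (titles.getD o ""))) then
            PySem.Set.add drop c
          else drop
        else drop) init ↔
    y ∈ init ∨ ∃ c ∈ codes, pvUns codes titles c ∧ y = c := by
  rw [pv_mem_foldl_of_step _ (fun c y => pvUns codes titles c ∧ y = c) ?_ codes init y]
  intro s c y
  by_cases h1 : pvIsUnspec (titles.getD c "") = true
  · by_cases h2 : (codes.any (fun o => !(o == c) && pvCategory o == pvCategory c && !(pvIsUnspec (titles.getD o "")))) = true
    · rw [if_pos h1, if_pos h2, PySem.Set.mem_add]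
      rw [List.any_eq_true] at h2
      constructor
      · rintro (hy | rfl)
        · exact Or.inl hy
        · refine Or.inr ⟨⟨h1, ?_⟩, rfl⟩
          obtain ⟨o, ho, hp⟩ := h2
          simp only [Bool.and_eq_true, Bool.not_eq_true', beq_eq_false_iff_ne, ne_eq, beq_iff_eq] at hp
          exact ⟨o, ho, hp.1.1, hp.1.2, hp.2⟩
      · rintro (hy | ⟨⟨_, _⟩, rfl⟩)
        · exact Or.inl hy
        · exact Or.inr rfl
    · rw [if_pos h1, if_neg h2]
      constructor
      · exact Or.inl
      · rintro (hy | ⟨⟨_, o, ho, hne, hcat, huns⟩, rfl⟩)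
        · exact hy
        · exfalso
          apply h2
          rw [List.any_eq_true]
          refine ⟨o, ho, ?_⟩
          simp only [Bool.and_eq_true, Bool.not_eq_true', beq_eq_false_iff_ne, ne_eq, beq_iff_eq]
          exact ⟨⟨hne, hcat⟩, huns⟩
  · rw [if_neg h1]
    constructor
    · exact Or.inl
    · rintro (hy | ⟨⟨huns, _⟩, rfl⟩)
      · exact hy
      · exact absurd huns h1

set_option maxHeartbeats 1000000 in
theorem pv_memA (codes : List String) (titles : PySem.Dict String String) (y : String) :
    y ∈ (codes.foldl (fun drop c =>
      if pvIsUnspec (titles.getD c "") then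
        if codes.any (fun o => !(o == c) && pvCategory o == pvCategory c && !(pvIsUnspec (titles.getD o ""))) then
          PySem.Set.add drop c
        else drop
      else drop)
      (codes.foldl (fun drop c =>
        codes.foldl (fun drop o =>
          if c == o then drop
          else if PySem.Str.startswith o c && PySem.Str.len c < PySem.Str.len o then PySem.Set.add drop c
          else drop) drop) PySem.Set.empty)) ↔
    ∃ c ∈ codes, (pvAnc codes c ∨ pvUns codes titles c) ∧ y = c := by
  rw [pv_mem_dropA2, pv_mem_dropA1]
  constructor
  · rintro (⟨c, hc, ha, hy⟩ | ⟨c, hc, hu, hy⟩)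
    · exact ⟨c, hc, Or.inl ha, hy⟩
    · exact ⟨c, hc, Or.inr hu, hy⟩
  · rintro ⟨c, hc, (ha | hu), hy⟩
    · exact Or.inl ⟨c, hc, ha, hy⟩
    · exact Or.inr ⟨c, hc, hu, hy⟩

-- B's prefix set: membership ⟺ some code properly extends y
theorem pv_mem_prefixes (codes : List String) (y : String) :
    y ∈ codes.foldl (fun pref o =>
        (PySem.List.pyRange 0 (PySem.Str.len o)).foldl
          (fun pref k => PySem.Set.add pref (PySem.Str.slice o none (some k))) pref) PySem.Set.empty ↔
    ∃ o ∈ codes, PySem.Str.startswith o y = true ∧ PySem.Str.len y < PySem.Str.len o := by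
  have hstep : ∀ (s : PySem.Set String) (o : String) (y : String),
      y ∈ (PySem.List.pyRange 0 (PySem.Str.len o)).foldl
          (fun pref k => PySem.Set.add pref (PySem.Str.slice o none (some k))) s ↔
      y ∈ s ∨ ∃ k ∈ PySem.List.pyRange 0 (PySem.Str.len o), PySem.Str.slice o none (some k) = y := by
    intro s o y
    exact pv_mem_foldl_of_step _ (fun k y => PySem.Str.slice o none (some k) = y)
      (fun s' k y' => (PySem.Set.mem_add s' _ y').trans (or_congr_right eq_comm)) _ s y
  rw [pv_mem_foldl_of_step _
    (fun o y => ∃ k ∈ PySem.List.pyRange 0 (PySem.Str.len o), PySem.Str.slice o none (some k) = y)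
    hstep codes PySem.Set.empty y]
  simp only [PySem.Set.empty, List.not_mem_nil, false_or]
  exact exists_congr fun o => and_congr_right fun _ => pv_prefix_iff o y

-- B's category set: membership ⟺ some code of that category is not unspecified
theorem pv_mem_specCats (codes : List String) (titles : PySem.Dict String String) (y : String) :
    y ∈ codes.foldl (fun cs c =>
        if !(pvIsUnspec (titles.getD c "")) then PySem.Set.add cs (pvCategory c) else cs) PySem.Set.empty ↔
    ∃ o ∈ codes, pvIsUnspec (titles.getD o "") = false ∧ y = pvCategory o := by
  rw [pv_mem_foldl_of_step _
    (fun c y => pvIsUnspec (titles.getD c "") = false ∧ y = pvCategory c) ?_ codes PySem.Set.empty y]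
  · simp [PySem.Set.empty]
  · intro s c y
    cases hb : pvIsUnspec (titles.getD c "") with
    | false =>
      rw [if_pos (by simp), PySem.Set.mem_add]
      tauto
    | true =>
      rw [if_neg (by simp)]
      constructor
      · exact Or.inl
      · rintro (hy | ⟨h, _⟩)
        · exact hy
        · rw [hb] at h; cases h

theorem pv_contains_true_iff (S : PySem.Set String) (x : String) :
    PySem.Set.contains S x = true ↔ x ∈ S := by
  simp [PySem.Set.contains]

set_option maxHeartbeats 1000000 in
theorem pv_memB (codes : List String) (titles : PySem.Dict String String) (y : String) :
    y ∈ (codes.foldl (fun drop c =>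
      if PySem.Set.contains (codes.foldl (fun pref o =>
            (PySem.List.pyRange 0 (PySem.Str.len o)).foldl
              (fun pref k => PySem.Set.add pref (PySem.Str.slice o none (some k))) pref) PySem.Set.empty) c ||
         (pvIsUnspec (titles.getD c "") && PySem.Set.contains (codes.foldl (fun cs c =>
            if !(pvIsUnspec (titles.getD c "")) then PySem.Set.add cs (pvCategory c) else cs) PySem.Set.empty) (pvCategory c)) then
        PySem.Set.add drop c
      else drop) PySem.Set.empty) ↔
    ∃ c ∈ codes, (pvAnc codes c ∨ pvUns codes titles c) ∧ y = c := by
  rw [pv_mem_foldl_of_step _ (fun c y => (pvAnc codes c ∨ pvUns codes titles c) ∧ y = c) ?_ codes PySem.Set.empty y]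
  · simp [PySem.Set.empty]
  · intro s c y
    have hcond : (PySem.Set.contains (codes.foldl (fun pref o =>
            (PySem.List.pyRange 0 (PySem.Str.len o)).foldl
              (fun pref k => PySem.Set.add pref (PySem.Str.slice o none (some k))) pref) PySem.Set.empty) c ||
         (pvIsUnspec (titles.getD c "") && PySem.Set.contains (codes.foldl (fun cs c =>
            if !(pvIsUnspec (titles.getD c "")) then PySem.Set.add cs (pvCategory c) else cs) PySem.Set.empty) (pvCategory c))) = true ↔
        (pvAnc codes c ∨ pvUns codes titles c) := by
      rw [Bool.or_eq_true, Bool.and_eq_true, pv_contains_true_iff, pv_contains_true_iff,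
        pv_mem_prefixes, pv_mem_specCats]
      constructor
      · rintro (⟨o, ho, hsw, hlt⟩ | ⟨hu, o, ho, hns, hcat⟩)
        · refine Or.inl ⟨o, ho, ?_, hsw, hlt⟩
          rintro rfl; exact lt_irrefl _ hlt
        · refine Or.inr ⟨hu, o, ho, ?_, hcat.symm, hns⟩
          rintro rfl; rw [hu] at hns; cases hns
      · rintro (⟨o, ho, _, hsw, hlt⟩ | ⟨hu, o, ho, _, hcat, hns⟩)
        · exact Or.inl ⟨o, ho, hsw, hlt⟩
        · exact Or.inr ⟨hu, o, ho, hns, hcat.symm⟩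
    by_cases h : (pvAnc codes c ∨ pvUns codes titles c)
    · rw [if_pos (hcond.mpr h), PySem.Set.mem_add]
      tauto
    · rw [if_neg (fun ht => h (hcond.mp ht))]
      tauto

theorem pv_contains_congr {S T : PySem.Set String} (h : ∀ x, x ∈ S ↔ x ∈ T) (x : String) :
    PySem.Set.contains S x = PySem.Set.contains T x := by
  cases hS : PySem.Set.contains S x <;> cases hT : PySem.Set.contains T x <;>
    simp_all [h x]

set_option maxHeartbeats 1000000 in
theorem drop_ancestors_and_unspecified_py_spec_aux (selected : List (List (String × String))) :
    drop_ancestors_and_unspecified_py selected = drop_ancestors_and_unspecified_py_alt selected := by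
  by_cases hsel : selected = []
  · simp [drop_ancestors_and_unspecified_py, drop_ancestors_and_unspecified_py_alt, hsel]
  · simp only [drop_ancestors_and_unspecified_py, drop_ancestors_and_unspecified_py_alt,
      if_neg hsel]
    rw [PySem.List.foldl_prod_mk
      (f := fun (acc : List String) s => if pvHasCode s then acc ++ [pvCode s] else acc)
      (g := fun (acc : PySem.Dict String String) s => acc.insert (pvCode s) (pvGetD s "title" ""))]
    simp only
    rw [PySem.List.foldl_append_if pvHasCode pvCode selected []]
    simp only [List.nil_append]
    refine List.filter_congr ?_
    intro s _
    have h := fun x => (pv_memA ((selected.filter pvHasCode).map pvCode)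
        (selected.foldl (fun d s => d.insert (pvCode s) (pvGetD s "title" "")) PySem.Dict.empty) x).trans
      (pv_memB ((selected.filter pvHasCode).map pvCode)
        (selected.foldl (fun d s => d.insert (pvCode s) (pvGetD s "title" "")) PySem.Dict.empty) x).symm
    rw [pv_contains_congr h (pvCode s)]
    exact rfl

-- ===== VERDICT (by name: the statement is the Claim_ definition above) =====
theorem drop_ancestors_and_unspecified_py_spec : Claim_equal_drop_ancestors_and_unspecified_py := by
  intro selected _
  exact drop_ancestors_and_unspecified_py_spec_aux selected
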